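-- pv_equiv track=rewrite | github.com/raystriker/adventOfCode2023 | day5/part1.py | create_mappings
-- ===== SOURCE A (Python) =====
-- def create_mappings(lines):
--     """Creates a mapping dictionary from the given lines."""
--     mappings = {}
--     current_map_key = None
--
--     for line in lines:
--         if line.endswith('map:'):
--             current_map_key = line
--             mappings[current_map_key] = []
--         elif current_map_key and line:
--             mappings[current_map_key].append(line.split(" "))
--
--     return mappings
-- ===== SOURCE B (Python) =====
-- def create_mappings(lines):
--     """Staged: collect header positions first, then slice each block out by index."""
--     n = len(lines)
--     heads = [(i, ln) for i, ln in enumerate(lines) if ln.endswith('map:')]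
--     stops = [i for i, _ in heads[1:]] + [n]
--     return {h: [ln.split(" ") for ln in lines[i + 1:stop] if ln]
--             for (i, h), stop in zip(heads, stops)}
-- ===== Notes on version B (the rewrite author's own statement) =====
-- stated objective: alternative
-- what changed: B is staged and index-based: it first enumerates the positions of all 'map:' header lines, pairs each header index with the next header index (or len(lines)), and builds every dict entry by slicing that block out of the original list and filtering/splitting it in a comprehension - instead of A's single stateful pass that mutates a current-key variable and appends into the dict line by line.
import Mathlib
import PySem

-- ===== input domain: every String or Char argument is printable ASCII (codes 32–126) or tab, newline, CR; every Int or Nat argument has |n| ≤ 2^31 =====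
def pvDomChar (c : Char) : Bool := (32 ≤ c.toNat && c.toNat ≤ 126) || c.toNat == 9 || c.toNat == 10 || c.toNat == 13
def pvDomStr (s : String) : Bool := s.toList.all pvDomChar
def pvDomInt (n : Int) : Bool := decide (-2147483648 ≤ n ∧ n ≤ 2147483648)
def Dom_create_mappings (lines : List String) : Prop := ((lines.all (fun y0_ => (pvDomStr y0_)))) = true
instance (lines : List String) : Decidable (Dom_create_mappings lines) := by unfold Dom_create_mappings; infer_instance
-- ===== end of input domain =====

-- B is staged and index-based (enumerate header positions, then slice each block
-- between consecutive headers out of the list) instead of A's single stateful pass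
-- with a mutable current key; same cost, different decomposition.

-- ===== PORT A =====
-- line.split(" ")
def pvSplit (ln : String) : List String := (PySem.Str.split? ln " ").getD []

-- loop body of A; state = (mappings, current_map_key)
def pvStepA (st : PySem.Dict String (List (List String)) × Option String)
    (line : String) : PySem.Dict String (List (List String)) × Option String :=
  if PySem.Str.endswith line "map:" then (st.1.insert line [], some line)
  else
    match st.2 with
    | some k =>
        -- `elif current_map_key and line:`; mappings[k].append(...): k is always
        -- present here, so Dict.modify with default [] is exact
        if k ≠ "" ∧ line ≠ "" then (st.1.modify k [] (· ++ [pvSplit line]), some k)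
        else st
    | none => st

def create_mappings (lines : List String) : List (String × List (List String)) :=
  ((lines.foldl pvStepA (PySem.Dict.empty, none)).1).items

-- ===== PORT B =====
def pvIsHeader (ln : String) : Bool := PySem.Str.endswith ln "map:"

-- Source B step for step: n = len(lines); heads = headers with their enumerate index;
-- stops = the following header indices plus n; dict comprehension over zip(heads, stops)
-- slicing lines[i+1:stop] and filtering/splitting.
def create_mappings_alt (lines : List String) : List (String × List (List String)) :=
  let n : Int := lines.length
  let heads := (PySem.List.enumerate lines 0).filter (fun p => pvIsHeader p.2)
  let stops := (heads.drop 1).map Prod.fst ++ [n]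
  ((heads.zip stops).foldl
      (fun d q => d.insert q.1.2
        (((PySem.List.slice lines (some (q.1.1 + 1)) (some q.2)).filter
            (fun ln => ln ≠ "")).map pvSplit))
      PySem.Dict.empty).items

-- ===== PRECONDITION & SPEC =====
def Spec_create_mappings (lines : List String) (out : List (String × List (List String))) : Prop := out = create_mappings_alt lines
instance (lines : List String) (out : List (String × List (List String))) : Decidable (Spec_create_mappings lines out) := by unfold Spec_create_mappings; infer_instance

-- ===== CLAIM (what is proved, stated in full; the proofs are below) =====
def Claim_equal_create_mappings : Prop := ∀ (lines : List String), Dom_create_mappings lines → Spec_create_mappings lines (create_mappings lines)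

-- ===== LEMMAS AND PROOFS =====

-- Proof-side intermediate program: block-at-a-time recursion, the common ground
-- between A's stateful fold and B's index arithmetic.

-- collect the data lines up to the next header
def pvTakeBlock : List String → List (List String) × List String
  | [] => ([], [])
  | l :: ls =>
      if pvIsHeader l then ([], l :: ls)
      else
        let r := pvTakeBlock ls
        (if l ≠ "" then pvSplit l :: r.1 else r.1, r.2)

theorem pvTakeBlock_len (ls : List String) : (pvTakeBlock ls).2.length ≤ ls.length := by
  induction ls with
  | nil => simp [pvTakeBlock]
  | cons l ls ih =>
      simp only [pvTakeBlock]
      split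
      · simp
      · simpa using Nat.le_succ_of_le ih

-- head is a header; take its block, assign, continue
def pvBlocks : List String → PySem.Dict String (List (List String)) →
    PySem.Dict String (List (List String))
  | [], out => out
  | h :: ls, out =>
      let r := pvTakeBlock ls
      pvBlocks r.2 (out.insert h r.1)
  termination_by ls _ => ls.length
  decreasing_by exact Nat.lt_succ_of_le (pvTakeBlock_len ls)

-- ignore lines before the first header
def pvSkipPre : List String → List String
  | [] => []
  | l :: ls => if pvIsHeader l then l :: ls else pvSkipPre ls

theorem pvHeader_ne (l : String) (h : PySem.Str.endswith l "map:" = true) : l ≠ "" := by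
  intro he; subst he; exact absurd h (by decide)

-- A's fold while a current key k is set appends exactly this block into k,
-- then proceeds from the next header.
theorem pvLsome (ls : List String) : ∀ (d : PySem.Dict String (List (List String)))
    (k : String) (acc : List (List String)), k ≠ "" →
    (List.foldl pvStepA (d.insert k acc, some k) ls).1
      = pvBlocks (pvTakeBlock ls).2 (d.insert k (acc ++ (pvTakeBlock ls).1)) := by
  induction ls with
  | nil => intro d k acc hk; simp [pvTakeBlock, pvBlocks]
  | cons l ls ih =>
      intro d k acc hk
      rw [List.foldl_cons]
      by_cases hh : PySem.Str.endswith l "map:" = true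
      · have e1 : pvStepA (d.insert k acc, some k) l = ((d.insert k acc).insert l [], some l) := by
          simp only [pvStepA]; rw [if_pos hh]
        have e2 : pvTakeBlock (l :: ls) = ([], l :: ls) := by
          simp only [pvTakeBlock, pvIsHeader]; rw [if_pos hh]
        rw [e1, e2, ih (d.insert k acc) l [] (pvHeader_ne l hh)]
        simp [pvBlocks]
      · by_cases hl : l = ""
        · have e1 : pvStepA (d.insert k acc, some k) l = (d.insert k acc, some k) := by
            simp only [pvStepA]; rw [if_neg hh, if_neg (by simp [hl])]
          have e2 : pvTakeBlock (l :: ls) = ((pvTakeBlock ls).1, (pvTakeBlock ls).2) := by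
            simp only [pvTakeBlock, pvIsHeader]; rw [if_neg hh, if_neg (by simp [hl])]
          rw [e1, e2, ih d k acc hk]
        · have e1 : pvStepA (d.insert k acc, some k) l
              = (d.insert k (acc ++ [pvSplit l]), some k) := by
            simp only [pvStepA]; rw [if_neg hh, if_pos (And.intro hk hl)]
            simp [PySem.Dict.modify, PySem.Dict.getD_insert_self,
              PySem.Dict.insert_insert_self]
          have e2 : pvTakeBlock (l :: ls)
              = (pvSplit l :: (pvTakeBlock ls).1, (pvTakeBlock ls).2) := by
            simp only [pvTakeBlock, pvIsHeader]; rw [if_neg hh, if_pos hl]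
          rw [e1, e2, ih d k (acc ++ [pvSplit l]) hk]
          simp

-- A's fold with no current key equals the block recursion after skipping the prefix.
theorem pvLnone (ls : List String) : ∀ (d : PySem.Dict String (List (List String))),
    (List.foldl pvStepA (d, none) ls).1 = pvBlocks (pvSkipPre ls) d := by
  induction ls with
  | nil => intro d; simp [pvSkipPre, pvBlocks]
  | cons l ls ih =>
      intro d
      rw [List.foldl_cons]
      by_cases hh : PySem.Str.endswith l "map:" = true
      · have e1 : pvStepA (d, none) l = (d.insert l [], some l) := by
          simp only [pvStepA]; rw [if_pos hh]
        have e2 : pvSkipPre (l :: ls) = l :: ls := by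
          simp only [pvSkipPre, pvIsHeader]; rw [if_pos hh]
        have e3 := pvLsome ls d l [] (pvHeader_ne l hh)
        simp only [List.nil_append] at e3
        rw [e1, e3, e2]
        simp [pvBlocks]
      · have e1 : pvStepA (d, none) l = (d, none) := by
          simp only [pvStepA]; rw [if_neg hh]
        have e2 : pvSkipPre (l :: ls) = pvSkipPre ls := by
          simp only [pvSkipPre, pvIsHeader]; rw [if_neg hh]
        rw [e1, e2, ih d]

-- the remainder of a block is exactly the skip-to-next-header suffix
theorem pvTP (ls : List String) : (pvTakeBlock ls).2 = pvSkipPre ls := by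
  induction ls with
  | nil => simp [pvTakeBlock, pvSkipPre]
  | cons l ls ih =>
      simp only [pvTakeBlock, pvSkipPre]
      split
      · rfl
      · simpa using ih

-- Nat-indexed header positions (proof-side mirror of B's enumerate/filter)
def pvHIdx : List String → Nat → List (Nat × String)
  | [], _ => []
  | l :: ls, k => if pvIsHeader l then (k, l) :: pvHIdx ls (k + 1) else pvHIdx ls (k + 1)

theorem pvHIdx_ge (ls : List String) : ∀ (s : Nat) (p : Nat × String),
    p ∈ pvHIdx ls s → s ≤ p.1 := by
  induction ls with
  | nil => intro s p h; simp [pvHIdx] at h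
  | cons l ls ih =>
      intro s p h
      simp only [pvHIdx] at h
      split at h
      · rcases List.mem_cons.1 h with h | h
        · subst h; exact le_refl s
        · exact Nat.le_of_succ_le (ih (s + 1) p h)
      · exact Nat.le_of_succ_le (ih (s + 1) p h)

-- B's enumerate/filter is pvHIdx with cast indices
theorem pvEB (ls : List String) : ∀ (s : Nat),
    (PySem.List.enumerate ls (s : Int)).filter (fun p => pvIsHeader p.2)
      = (pvHIdx ls s).map (fun p => ((p.1 : Int), p.2)) := by
  induction ls with
  | nil => intro s; simp [PySem.List.enumerate_nil, pvHIdx]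
  | cons l ls ih =>
      intro s
      rw [PySem.List.enumerate_cons, List.filter_cons]
      have hc : ((s : Int) + 1) = ((s + 1 : Nat) : Int) := by push_cast; ring
      by_cases hh : pvIsHeader l = true
      · simp only [hh, if_pos, pvHIdx, List.map_cons, hc, ih (s + 1)]
      · simp only [pvHIdx, hh]
        rw [if_neg (by simp), if_neg (by simp), hc, ih (s + 1)]

-- the Nat-world pairing of headers with their stop indices
def pvZipStops (n : Nat) (hs : List (Nat × String)) : List ((Nat × String) × Nat) :=
  hs.zip ((hs.drop 1).map Prod.fst ++ [n])

-- the Nat-world fold step of B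
def pvNatF (lines : List String) (d : PySem.Dict String (List (List String)))
    (q : (Nat × String) × Nat) : PySem.Dict String (List (List String)) :=
  d.insert q.1.2
    ((((lines.drop (q.1.1 + 1)).take (q.2 - (q.1.1 + 1))).filter (fun ln => ln ≠ "")).map pvSplit)

-- the first block, computed by index arithmetic, is pvTakeBlock's block
theorem pvBLK (lines : List String) : ∀ (ls : List String) (j : Nat),
    lines.drop j = ls →
    ((ls.take ((((pvHIdx ls j).head?.map Prod.fst).getD lines.length) - j)).filter
        (fun ln => ln ≠ "")).map pvSplit
      = (pvTakeBlock ls).1 := by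
  intro ls
  induction ls with
  | nil => intro j _; simp [pvHIdx, pvTakeBlock]
  | cons l ls ih =>
      intro j hd
      have hjlt : j < lines.length := by
        by_contra hge
        rw [List.drop_eq_nil_of_le (Nat.le_of_not_lt hge)] at hd
        simp at hd
      have hd' : lines.drop (j + 1) = ls := by
        have := congrArg List.tail hd
        rw [List.tail_drop] at this
        simpa using this
      by_cases hh : pvIsHeader l = true
      · simp [pvHIdx, hh, pvTakeBlock]
      · have hge : j + 1 ≤ (((pvHIdx ls (j + 1)).head?.map Prod.fst).getD lines.length) := by
          cases hhd : (pvHIdx ls (j + 1)).head? with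
          | none => simpa using hjlt
          | some p =>
              have := pvHIdx_ge ls (j + 1) p (List.mem_of_mem_head? hhd)
              simpa [hhd] using this
        have hsub : (((pvHIdx ls (j + 1)).head?.map Prod.fst).getD lines.length) - j
            = ((((pvHIdx ls (j + 1)).head?.map Prod.fst).getD lines.length) - (j + 1)) + 1 := by
          omega
        simp only [pvHIdx, hh, if_neg, Bool.false_eq_true, not_false_iff, hsub,
          List.take_succ_cons, List.filter_cons, pvTakeBlock]
        rw [← ih (j + 1) hd']
        by_cases hl : l = ""
        · simp [hl]
        · simp [hl]

-- B's Nat-world fold equals the block recursion after skipping the prefix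
theorem pvG (lines : List String) : ∀ (ls : List String) (k : Nat)
    (d : PySem.Dict String (List (List String))), lines.drop k = ls →
    (pvZipStops lines.length (pvHIdx ls k)).foldl (pvNatF lines) d
      = pvBlocks (pvSkipPre ls) d := by
  intro ls
  induction ls with
  | nil => intro k d _; simp [pvHIdx, pvZipStops, pvSkipPre, pvBlocks]
  | cons l ls ih =>
      intro k d hd
      have hd' : lines.drop (k + 1) = ls := by
        have := congrArg List.tail hd
        rw [List.tail_drop] at this
        simpa using this
      by_cases hh : pvIsHeader l = true
      · have hs : pvSkipPre (l :: ls) = l :: ls := by simp [pvSkipPre, hh]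
        rw [hs]
        have hb : pvBlocks (l :: ls) d
            = pvBlocks (pvTakeBlock ls).2 (d.insert l (pvTakeBlock ls).1) := by
          simp [pvBlocks]
        rw [hb, pvTP]
        set s0 : Nat := (((pvHIdx ls (k + 1)).head?.map Prod.fst).getD lines.length) with hs0
        have hfold :
            (pvZipStops lines.length (pvHIdx (l :: ls) k)).foldl (pvNatF lines) d
              = (pvZipStops lines.length (pvHIdx ls (k + 1))).foldl (pvNatF lines)
                  (pvNatF lines d ((k, l), s0)) := by
          simp only [pvHIdx, hh, if_pos]
          cases hhs : pvHIdx ls (k + 1) with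
          | nil => simp [pvZipStops, hhs, hs0]
          | cons x hs'' =>
              simp [pvZipStops, hhs, hs0]
        rw [hfold, ih (k + 1) _ hd']
        congr 1
        simp only [pvNatF]
        rw [hd', pvBLK lines ls (k + 1) hd']
      · have hs : pvSkipPre (l :: ls) = pvSkipPre ls := by simp [pvSkipPre, hh]
        have hi : pvHIdx (l :: ls) k = pvHIdx ls (k + 1) := by simp [pvHIdx, hh]
        rw [hi, hs, ih (k + 1) d hd']

-- B's port computes the Nat-world fold
theorem pvAltEq (lines : List String) :
    create_mappings_alt lines
      = ((pvZipStops lines.length (pvHIdx lines 0)).foldl (pvNatF lines)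
          PySem.Dict.empty).items := by
  simp only [create_mappings_alt]
  have he : (PySem.List.enumerate lines (0 : Int)).filter (fun p => pvIsHeader p.2)
      = (pvHIdx lines 0).map (fun p => ((p.1 : Int), p.2)) := by
    have := pvEB lines 0
    simpa using this
  rw [he]
  have hstops : (((pvHIdx lines 0).map (fun p => ((p.1 : Int), p.2))).drop 1).map Prod.fst
        ++ [(lines.length : Int)]
      = (((pvHIdx lines 0).drop 1).map Prod.fst ++ [lines.length]).map
          (fun m : Nat => (m : Int)) := by
    rw [← List.map_drop, List.map_map, List.map_append, List.map_map]
    rfl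
  rw [hstops]
  rw [List.zip_map, List.foldl_map]
  unfold pvZipStops pvNatF
  congr 1
  apply List.foldl_ext
  intro d q _
  obtain ⟨⟨i, h⟩, m⟩ := q
  have hc : ((i : Int) + 1) = ((i + 1 : Nat) : Int) := by push_cast; ring
  simp only [Prod.map, hc, PySem.List.slice_natCast]

-- ===== VERDICT (by name: the statement is the Claim_ definition above) =====
theorem create_mappings_spec : Claim_equal_create_mappings := by
  intro lines _
  unfold Spec_create_mappings create_mappings
  rw [pvLnone lines PySem.Dict.empty, pvAltEq lines, pvG lines lines 0 PySem.Dict.empty (by simp)]
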